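-- pv_equiv track=rewrite | github.com/Yotta-private/RCDD-project-1 | Deep Learning Models/RNN/Construct VOC.py | construct_vocabulary
-- ===== SOURCE A (Python) =====
-- def construct_vocabulary(tokens):
--     """Adds tokens to the vocabulary"""
--     vocab = {}
--     for token in tokens:
--         if token in vocab:
--             vocab[token] += 1
--         else:
--             vocab[token] = 1
--     token_list = sorted(vocab, key=vocab.get, reverse=True)
--     return token_list
-- ===== SOURCE B (Python) =====
-- def construct_vocabulary(tokens):
--     """Adds tokens to the vocabulary (bucket/counting sort by frequency)"""
--     vocab = {}
--     for token in tokens: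
--         vocab[token] = vocab.get(token, 0) + 1
--     if not vocab:
--         return []
--     max_count = max(vocab.values())
--     buckets = [[] for _ in range(max_count + 1)]
--     for token in vocab:
--         buckets[vocab[token]].append(token)
--     token_list = []
--     for count in range(max_count, 0, -1):
--         token_list.extend(buckets[count])
--     return token_list
-- ===== Notes on version B (the rewrite author's own statement) =====
-- stated objective: alternative
-- what changed: Replaces the stable reverse sort of the dict keys by frequency with a counting/bucket sort: tokens are appended to buckets[count] in first-seen order and the buckets are emitted from max_count down to 1.
import Mathlib
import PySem

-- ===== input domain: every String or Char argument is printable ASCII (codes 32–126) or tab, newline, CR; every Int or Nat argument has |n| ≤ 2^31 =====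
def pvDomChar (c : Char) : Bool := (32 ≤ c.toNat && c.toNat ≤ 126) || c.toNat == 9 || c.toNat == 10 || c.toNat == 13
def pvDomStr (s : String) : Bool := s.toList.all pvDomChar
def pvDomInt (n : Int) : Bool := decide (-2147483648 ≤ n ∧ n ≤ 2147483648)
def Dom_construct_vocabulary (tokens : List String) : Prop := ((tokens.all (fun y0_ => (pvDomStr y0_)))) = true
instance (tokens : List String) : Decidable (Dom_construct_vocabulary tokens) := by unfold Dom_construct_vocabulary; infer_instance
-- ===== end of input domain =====

-- B replaces A's stable reverse sort of the dict keys by frequency with a counting/bucket sort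
-- (buckets indexed by count, emitted from max_count down to 1) — an alternative algorithm, same result.

-- ===== PORT A =====
-- sorted(vocab, key=vocab.get, reverse=True): every sorted element is a key of vocab, so
-- vocab.get(t) is its count; ported as `getD t 0`, exact on the elements being sorted.
def construct_vocabulary (tokens : List String) : List String :=
  let vocab := tokens.foldl
    (fun d token => if d.contains token then d.insert token (d.getD token 0 + 1) else d.insert token 1)
    (PySem.Dict.empty : PySem.Dict String Int)
  PySem.List.sorted vocab.keys (fun t => vocab.getD t 0) true

-- ===== PORT B =====
-- `if not vocab: return []` is the `none` branch of max? (max? = none iff vocab.values = []).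
-- Counts are ≥ 1 and ≤ max_count, so the bucket index `(…).toNat` is Python-exact (never negative,
-- always in range); `buckets[c].append(t)` is the functional update `set c (getD c [] ++ [t])`.
def construct_vocabulary_alt (tokens : List String) : List String :=
  let vocab := tokens.foldl (fun d token => d.insert token (d.getD token 0 + 1))
    (PySem.Dict.empty : PySem.Dict String Int)
  match PySem.List.max? vocab.values (fun v => v) with
  | none => []
  | some maxCount =>
    let buckets := vocab.keys.foldl
      (fun bs token =>
        bs.set (vocab.getD token 0).toNat (bs.getD (vocab.getD token 0).toNat [] ++ [token]))
      (List.replicate (maxCount.toNat + 1) [])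
    (PySem.List.pyRange maxCount 0 (-1)).foldl (fun out count => out ++ buckets.getD count.toNat []) []

-- ===== PRECONDITION & SPEC =====
def Spec_construct_vocabulary (tokens : List String) (out : List String) : Prop := out = construct_vocabulary_alt tokens
instance (tokens : List String) (out : List String) : Decidable (Spec_construct_vocabulary tokens out) := by unfold Spec_construct_vocabulary; infer_instance

-- ===== CLAIM (what is proved, stated in full; the proofs are below) =====
def Claim_equal_construct_vocabulary : Prop := ∀ (tokens : List String), Dom_construct_vocabulary tokens → Spec_construct_vocabulary tokens (construct_vocabulary tokens)

-- ===== LEMMAS AND PROOFS =====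

-- [M, M-1, …, 1] — the value of range(max_count, 0, -1)
def descInts : Nat → List Int
  | 0 => []
  | m + 1 => ((m : Int) + 1) :: descInts m

lemma mapRange_descInts (m : Nat) :
    (List.range m).map (fun k : Nat => (m : Int) - (k : Int)) = descInts m := by
  induction m with
  | zero => simp [descInts]
  | succ m ih =>
    rw [List.range_succ_eq_map, descInts, List.map_cons, List.map_map]
    refine congrArg₂ List.cons (by push_cast; ring) ?_
    rw [← ih]
    apply List.map_congr_left
    intro k _
    simp only [Function.comp_apply, Nat.succ_eq_add_one]
    push_cast; ring

lemma pyRange_neg_one (M : Int) (h : 0 ≤ M) :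
    PySem.List.pyRange M 0 (-1) = descInts M.toNat := by
  obtain ⟨m, rfl⟩ := Int.eq_ofNat_of_zero_le h
  simp only [PySem.List.pyRange]
  norm_num
  rcases Nat.eq_zero_or_pos m with hm | hm
  · subst hm; simp [descInts]
  · rw [if_pos hm]
    rw [← mapRange_descInts]
    apply List.map_congr_left
    intro k _
    ring

lemma mem_descInts {c : Int} {m : Nat} (h : c ∈ descInts m) : 1 ≤ c ∧ c ≤ m := by
  induction m with
  | zero => simp [descInts] at h
  | succ m ih =>
    simp only [descInts, List.mem_cons] at h
    rcases h with rfl | h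
    · push_cast; omega
    · rcases ih h with ⟨h1, h2⟩
      push_cast at h2 ⊢; omega

-- grouped-by-count form: for each count c from m down to 1, the xs with key = c, in order
def grpBy (key : String → Int) (m : Nat) (xs : List String) : List String :=
  (descInts m).flatMap (fun c => xs.filter (fun a => key a == c))

lemma grpBy_nil (key : String → Int) (m : Nat) : grpBy key m [] = [] := by
  simp [grpBy]

lemma key_le_of_mem_grpBy {key : String → Int} {m : Nat} {xs : List String} {a : String}
    (h : a ∈ grpBy key m xs) : key a ≤ m := by
  simp only [grpBy, List.mem_flatMap, List.mem_filter] at h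
  obtain ⟨c, hc, _, hk⟩ := h
  have := (mem_descInts hc).2
  have hk' : key a = c := by simpa using hk
  omega

lemma grpBy_append_of_gt {key : String → Int} {m : Nat} {xs : List String} {x : String}
    (h : (m : Int) < key x) : grpBy key m (xs ++ [x]) = grpBy key m xs := by
  unfold grpBy
  induction m with
  | zero => simp [descInts]
  | succ m ih =>
    simp only [descInts, List.flatMap_cons] at *
    rw [ih (by push_cast at h ⊢; omega)]
    congr 1
    rw [List.filter_append]
    have hx : [x].filter (fun a => key a == ((m : Int) + 1)) = [] := by
      have hne : ¬ (key x = (m : Int) + 1) := by push_cast at h; omega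
      simp [hne]
    simp [hx]

lemma insertBy_false_true {α : Type} (f : α → α → Bool) (x : α) (A B : List α)
    (hA : ∀ a ∈ A, f x a = false) (hB : ∀ b ∈ B, f x b = true) :
    PySem.List.insertBy f x (A ++ B) = A ++ x :: B := by
  induction A with
  | nil =>
    cases B with
    | nil => simp [PySem.List.insertBy]
    | cons b B' => simp [PySem.List.insertBy, hB b (by simp)]
  | cons a A' ih =>
    have hfa := hA a (by simp)
    simp only [List.cons_append, PySem.List.insertBy, hfa]
    simp only [Bool.false_eq_true, if_false]
    rw [ih (fun a' ha' => hA a' (by simp [ha']))]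

lemma insertBy_append_left {α : Type} (f : α → α → Bool) (x : α) (A B : List α)
    (hA : ∀ a ∈ A, f x a = false) :
    PySem.List.insertBy f x (A ++ B) = A ++ PySem.List.insertBy f x B := by
  induction A with
  | nil => simp
  | cons a A' ih =>
    have hfa := hA a (by simp)
    simp only [List.cons_append, PySem.List.insertBy, hfa]
    simp only [Bool.false_eq_true, if_false]
    rw [ih (fun a' ha' => hA a' (by simp [ha']))]

lemma insertBy_grpBy (key : String → Int) (m : Nat) (xs : List String) (x : String)
    (h1 : 1 ≤ key x) (h2 : key x ≤ m) :
    PySem.List.insertBy (fun a b => decide (key b < key a)) x (grpBy key m xs)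
      = grpBy key m (xs ++ [x]) := by
  induction m generalizing xs with
  | zero => exact absurd h2 (by push_cast; omega)
  | succ m ih =>
    have hgrp : ∀ ys : List String, grpBy key (m+1) ys
        = ys.filter (fun a => key a == ((m : Int) + 1)) ++ grpBy key m ys := by
      intro ys; simp [grpBy, descInts]
    rw [hgrp xs]
    by_cases hx : key x = (m : Int) + 1
    · rw [insertBy_false_true]
      · rw [hgrp (xs ++ [x])]
        rw [List.filter_append]
        have : [x].filter (fun a => key a == ((m : Int) + 1)) = [x] := by simp [hx]
        rw [this, grpBy_append_of_gt (by omega : (m : Int) < key x)]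
        simp
      · intro a ha
        have : key a = (m : Int) + 1 := by simpa using (List.mem_filter.mp ha).2
        simp [this, hx]
      · intro b hb
        have := key_le_of_mem_grpBy hb
        simp only [decide_eq_true_eq]
        omega
    · have hx' : key x ≤ (m : Int) := by push_cast at h2 ⊢; omega
      rw [insertBy_append_left]
      · rw [ih xs (by exact_mod_cast hx')]
        rw [hgrp (xs ++ [x])]
        rw [List.filter_append]
        have : [x].filter (fun a => key a == ((m : Int) + 1)) = [] := by simp [hx]
        rw [this, List.append_nil]
      · intro a ha
        have : key a = (m : Int) + 1 := by simpa using (List.mem_filter.mp ha).2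
        simp only [decide_eq_false_iff_not]
        omega

lemma sorted_rev_eq_grpBy (key : String → Int) (M : Nat) (xs : List String)
    (h : ∀ a ∈ xs, 1 ≤ key a ∧ key a ≤ M) :
    PySem.List.sorted xs key true = grpBy key M xs := by
  induction xs using List.reverseRecOn with
  | nil => simp [PySem.List.sorted_rev_eq_foldl_insertBy, grpBy_nil]
  | append_singleton ys x ih =>
    rw [PySem.List.sorted_rev_eq_foldl_insertBy, List.foldl_append, List.foldl_cons, List.foldl_nil,
      ← PySem.List.sorted_rev_eq_foldl_insertBy]
    rw [ih (fun a ha => h a (by simp [ha]))]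
    exact insertBy_grpBy key M ys x (h x (by simp)).1 (h x (by simp)).2

lemma getD_set_of_lt {α : Type} (bs : List α) (i j : Nat) (v d : α) (hi : i < bs.length) :
    (bs.set i v).getD j d = if i = j then v else bs.getD j d := by
  simp only [List.getD_eq_getElem?_getD, List.getElem?_set]
  by_cases h : i = j
  · subst h; simp [hi]
  · simp [h]

lemma getD_replicate_self {α : Type} (n c : Nat) (v : α) :
    (List.replicate n v).getD c v = v := by
  by_cases h : c < n
  · simp [List.getD_eq_getElem?_getD, h]
  · simp [List.getD_eq_getElem?_getD, h]

lemma buckets_getD (f : String → Int) (l : List String) (bs : List (List String))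
    (hf : ∀ t ∈ l, (f t).toNat < bs.length) (c : Nat) :
    (l.foldl (fun bs t => bs.set (f t).toNat (bs.getD (f t).toNat [] ++ [t])) bs).getD c []
      = bs.getD c [] ++ l.filter (fun t => (f t).toNat == c) := by
  induction l generalizing bs with
  | nil => simp
  | cons t l ih =>
    simp only [List.foldl_cons, List.filter_cons]
    rw [ih _ (fun u hu => by rw [List.length_set]; exact hf u (by simp [hu]))]
    rw [getD_set_of_lt _ _ _ _ _ (hf t (by simp))]
    by_cases h : (f t).toNat = c
    · simp [h]
    · simp [h]

-- ===== VERDICT (by name: the statement is the Claim_ definition above) =====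
theorem construct_vocabulary_spec : Claim_equal_construct_vocabulary := by
  intro tokens _
  unfold Spec_construct_vocabulary
  show construct_vocabulary tokens = construct_vocabulary_alt tokens
  have hA : tokens.foldl
      (fun d token => if d.contains token then d.insert token (d.getD token 0 + 1) else d.insert token 1)
      (PySem.Dict.empty : PySem.Dict String Int) = PySem.Dict.counter tokens := by
    refine Eq.trans (PySem.List.foldl_congr_mem tokens _
      (fun d token => d.insert token (d.getD token 0 + 1)) (PySem.Dict.empty : PySem.Dict String Int) ?_)
      (PySem.Dict.foldl_insert_getD_add_one_eq_counter tokens)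
    intro d t _
    by_cases h : d.contains t = true
    · simp [h]
    · have h0 : d.getD t 0 = 0 :=
        PySem.Dict.getD_of_not_contains _ _ (by simpa using h)
      simp [h, h0]
  simp only [construct_vocabulary, construct_vocabulary_alt]
  simp only [hA, PySem.Dict.foldl_insert_getD_add_one_eq_counter]
  have hvals : (PySem.Dict.counter tokens).values
      = (PySem.Set.ofList tokens).map (fun t => (tokens.count t : Int)) := by
    rw [PySem.Dict.values_eq_map_keys _ (PySem.Dict.nodup_keys_counter tokens) 0,
      PySem.Dict.keys_counter]
    exact List.map_congr_left (fun k _ => PySem.Dict.getD_counter tokens k)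
  simp only [PySem.Dict.keys_counter, PySem.Dict.getD_counter, hvals]
  cases hmax : PySem.List.max? ((PySem.Set.ofList tokens).map (fun t => (tokens.count t : Int))) (fun v => v) with
  | none =>
    rw [PySem.List.max?_eq_none_iff] at hmax
    have hk : PySem.Set.ofList tokens = [] := List.map_eq_nil_iff.mp hmax
    rw [hk]
    rfl
  | some M =>
    show PySem.List.sorted (PySem.Set.ofList tokens) (fun t => ((tokens.count t : Int))) true
      = List.foldl
          (fun out count =>
            out ++
              (List.foldl
                    (fun bs token =>
                      bs.set ((tokens.count token : Int)).toNat
                        (bs.getD ((tokens.count token : Int)).toNat [] ++ [token]))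
                    (List.replicate (M.toNat + 1) []) (PySem.Set.ofList tokens)).getD
                count.toNat [])
          [] (PySem.List.pyRange M 0 (-1))
    have hub : ∀ k ∈ PySem.Set.ofList tokens, (tokens.count k : Int) ≤ M := fun k hk =>
      PySem.List.max?_isMax hmax _ (List.mem_map_of_mem hk)
    have hlb : ∀ k ∈ PySem.Set.ofList tokens, 1 ≤ (tokens.count k : Int) := fun k hk => by
      have := List.count_pos_iff.mpr ((PySem.Set.mem_ofList tokens k).mp hk)
      omega
    have hM1 : 1 ≤ M := by
      obtain ⟨k0, hk0, hk0M⟩ := List.mem_map.mp (PySem.List.max?_mem hmax)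
      have := hlb k0 hk0
      omega
    have hMnat : ((M.toNat : Int)) = M := Int.toNat_of_nonneg (by omega)
    rw [sorted_rev_eq_grpBy _ M.toNat _
      (fun a ha => ⟨hlb a ha, by rw [hMnat]; exact hub a ha⟩)]
    rw [PySem.List.foldl_append_eq_flatMap, List.nil_append, pyRange_neg_one M (by omega)]
    unfold grpBy
    apply List.flatMap_congr
    intro c hc
    obtain ⟨hc1, hc2⟩ := mem_descInts hc
    rw [buckets_getD (fun t => (tokens.count t : Int)) _ _
      (fun t ht => by
        rw [List.length_replicate]
        have h := hub t ht
        show ((tokens.count t : Int)).toNat < M.toNat + 1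
        omega)]
    rw [getD_replicate_self]
    rw [List.nil_append]
    apply List.filter_congr
    intro a ha
    have h1 := hlb a ha
    rw [Bool.eq_iff_iff]
    simp only [beq_iff_eq]
    omega
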